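-- pv_equiv track=rewrite | github.com/HussainAbuwala/Algorithms-and-Data-Structures | FIT3155/Assignment-2/q3/intseqdecode.py | find_decode_strings
-- ===== SOURCE A (Python) =====
-- def find_next_start(bit_string,index):
--
--     if(bit_string[index] == "1"):
--
--         # Detected a leaf
--         # recurse back
--         return index + 1
--     else:
--
--         # preorder traversal - Root, left, right
--         # implicitly i am currently at the root ar 'index' or root = bit_string[index]
--
--         # go left
--         l = find_next_start(bit_string,index + 1)
--         r = find_next_start(bit_string,l)
--         return r
--
-- def find_decode_strings(bit_string):
--
--     strings_to_decode = []
--     index = 0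
--
--     while (index < len(bit_string)):
--         new_start = find_next_start(bit_string,index)
--         strings_to_decode.append(bit_string[index:new_start])
--         index = new_start
--
--     return strings_to_decode
-- ===== SOURCE B (Python) =====
-- def find_decode_strings(bit_string):
--     # Iterative pending-subtree counter; collects each encoding's characters
--     # directly (no recursion, no slicing).
--     strings_to_decode = []
--     n = len(bit_string)
--     i = 0
--     while i < n:
--         need = 1
--         cur = []
--         while need:
--             ch = bit_string[i]
--             cur.append(ch)
--             need -= 1
--             if ch != "1":
--                 need += 2
--             i += 1
--         strings_to_decode.append("".join(cur))
--     return strings_to_decode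
-- ===== Notes on version B (the rewrite author's own statement) =====
-- stated objective: alternative
-- what changed: The recursive preorder parser find_next_start plus an outer loop that re-slices the string is replaced by a single iterative scan: a pending-subtree counter drives an inner loop that accumulates each encoding's characters directly, so there is no recursion and no slicing.
import Mathlib
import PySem

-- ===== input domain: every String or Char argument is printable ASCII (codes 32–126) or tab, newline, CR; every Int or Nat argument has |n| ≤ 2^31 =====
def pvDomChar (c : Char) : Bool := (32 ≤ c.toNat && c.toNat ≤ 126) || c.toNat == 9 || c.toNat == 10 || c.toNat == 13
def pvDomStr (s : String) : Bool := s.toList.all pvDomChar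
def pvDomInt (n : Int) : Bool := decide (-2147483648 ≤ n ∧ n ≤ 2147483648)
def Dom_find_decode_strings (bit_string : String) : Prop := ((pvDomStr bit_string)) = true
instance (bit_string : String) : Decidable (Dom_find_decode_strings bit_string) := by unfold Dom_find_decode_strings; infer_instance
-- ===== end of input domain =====

-- B replaces A's recursive preorder parser (plus an outer loop that re-slices the string) by one
-- iterative scan: a pending-subtree counter drives an inner loop that collects each encoding's
-- characters directly; behaviour is identical wherever A returns.
-- Indices in port A are always nonnegative with 0 ≤ index ≤ new_start, so Nat indexing / drop-take
-- slicing is exact here. Fuel (bit_string.length + 1, an upper bound on steps) only makes A's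
-- recursions total; it never changes the computed value on any input.
-- ===== PORT A =====
-- find_next_start: recursive descent (Root, left, right); none = IndexError on a truncated encoding.
def fnsA (s : List Char) : Nat → Nat → Option Nat
  | 0, _ => none
  | f + 1, i =>
    match s[i]? with
    | none => none
    | some c =>
      if c = '1' then some (i + 1)
      else
        match fnsA s f (i + 1) with
        | none => none
        | some l => fnsA s f l
def outerA (s : List Char) : Nat → Nat → List String → List String
  | 0, _, acc => acc.reverse
  | f + 1, index, acc =>
    if index < s.length then
      match fnsA s (s.length + 1) index with
      | none => acc.reverse   -- Python raises IndexError here; excluded by Pre_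
      | some ns => outerA s f ns (String.ofList ((s.drop index).take (ns - index)) :: acc)
    else acc.reverse
def find_decode_strings (bit_string : String) : List String :=
  outerA bit_string.toList (bit_string.toList.length + 1) 0 []

-- ===== PORT B =====
-- inner while loop of Source B: need = pending subtrees, cur = characters collected so far;
-- none = IndexError on a truncated encoding.
def innerB (s : List Char) : Nat → Nat → Nat → List Char → Option (Nat × List Char)
  | 0, _, _, _ => none
  | f + 1, i, need, cur =>
    if need = 0 then some (i, cur)
    else
      match s[i]? with
      | none => none
      | some c => innerB s f (i + 1) ((need - 1) + (if c ≠ '1' then 2 else 0)) (cur ++ [c])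
def outerB (s : List Char) : Nat → Nat → List String → List String
  | 0, _, acc => acc
  | f + 1, i, acc =>
    if i < s.length then
      match innerB s (s.length + 1) i 1 [] with
      | none => acc   -- Python raises IndexError here; excluded by Pre_
      | some (j, cur) => outerB s f j (acc ++ [String.ofList cur])
    else acc
def find_decode_strings_alt (bit_string : String) : List String :=
  outerB bit_string.toList (bit_string.toList.length + 1) 0 []

-- ===== PRECONDITION & SPEC =====
-- Pre_ excludes exactly the truncated/malformed encodings on which Python A raises IndexError:
-- the string must be a concatenation of complete preorder tree encodings, checked by the standard
-- balanced-encoding counter (reset at each tree start; a leaf bit consumes a pending slot, any other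
-- character adds two pending children); the scan must end with nothing pending.
def Pre_find_decode_strings (bit_string : String) : Prop :=
  bit_string.toList.foldl
    (fun cur c => (if cur = 0 then 1 else cur) + (if c = '1' then 0 else 2) - 1) 0 = 0
instance (bit_string : String) : Decidable (Pre_find_decode_strings bit_string) := by
  unfold Pre_find_decode_strings; infer_instance
def pvWitness_find_decode_strings : String := "01011"
def Spec_find_decode_strings (bit_string : String) (out : List String) : Prop := out = find_decode_strings_alt bit_string
instance (bit_string : String) (out : List String) : Decidable (Spec_find_decode_strings bit_string out) := by unfold Spec_find_decode_strings; infer_instance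

-- ===== CLAIM (what is proved, stated in full; the proofs are below) =====
def Claim_equal_find_decode_strings : Prop := ∀ (bit_string : String), Dom_find_decode_strings bit_string → Pre_find_decode_strings bit_string → Spec_find_decode_strings bit_string (find_decode_strings bit_string)

-- ===== LEMMAS AND PROOFS =====
-- fnsA's successful result is strictly past its start and within the string.
theorem fnsA_bounds (s : List Char) :
    ∀ f i l, fnsA s f i = some l → i < l ∧ l ≤ s.length := by
  intro f
  induction f with
  | zero => intro i l h; simp [fnsA] at h
  | succ f ih =>
    intro i l h
    unfold fnsA at h
    cases hg : s[i]? with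
    | none => simp [hg] at h
    | some c =>
      have hi : i < s.length := by
        by_contra hle
        rw [List.getElem?_eq_none (by omega)] at hg; simp at hg
      rw [hg] at h
      by_cases hc : c = '1'
      · simp [hc] at h; omega
      · simp [hc] at h
        cases hl : fnsA s f (i + 1) with
        | none => rw [hl] at h; simp at h
        | some m =>
          rw [hl] at h
          have h1 := ih (i + 1) m hl
          have h2 := ih m l h
          omega

-- Fuel stabilization for fnsA: any fuel ≥ (remaining length) + 1 gives the same result.
theorem fnsA_stab (s : List Char) :
    ∀ f g i, s.length - i + 1 ≤ f → s.length - i + 1 ≤ g → fnsA s f i = fnsA s g i := by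
  intro f
  induction f with
  | zero => intro g i hf _; omega
  | succ f ih =>
    intro g i hf hg
    cases g with
    | zero => omega
    | succ g =>
      unfold fnsA
      cases hgi : s[i]? with
      | none => rfl
      | some c =>
        have hi : i < s.length := by
          by_contra hle
          rw [List.getElem?_eq_none (by omega)] at hgi; simp at hgi
        by_cases hc : c = '1'
        · simp [hc]
        · simp only [hc, if_false]
          have e1 : fnsA s f (i + 1) = fnsA s g (i + 1) := ih g (i + 1) (by omega) (by omega)
          rw [e1]
          cases hl : fnsA s g (i + 1) with
          | none => simp
          | some l =>
            have hb := fnsA_bounds s g (i + 1) l hl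
            exact ih g l (by omega) (by omega)

-- Fuel stabilization for innerB.
theorem innerB_stab (s : List Char) :
    ∀ f g i need cur, s.length - i + 1 ≤ f → s.length - i + 1 ≤ g →
      innerB s f i need cur = innerB s g i need cur := by
  intro f
  induction f with
  | zero => intro g i need cur hf _; omega
  | succ f ih =>
    intro g i need cur hf hg
    cases g with
    | zero => omega
    | succ g =>
      unfold innerB
      by_cases hn : need = 0
      · simp [hn]
      · simp only [hn, if_false]
        cases hgp : s[i]? with
        | none => rfl
        | some c =>
          have hp : i < s.length := by
            by_contra hle
            rw [List.getElem?_eq_none (by omega)] at hgp; simp at hgp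
          exact ih g (i + 1) _ _ (by omega) (by omega)

-- Splitting a slice at an interior point.
theorem slice_split (s : List Char) (i m l : Nat) (him : i ≤ m) (hml : m ≤ l) :
    (s.drop i).take (l - i) = (s.drop i).take (m - i) ++ (s.drop m).take (l - m) := by
  rw [show l - i = (m - i) + (l - m) by omega, List.take_add]
  congr 1
  rw [List.drop_drop, show i + (m - i) = m by omega]

-- B's inner loop with need+1 pending first consumes one tree — exactly the characters fnsA
-- delimits — and continues with need pending and those characters collected.
theorem innerB_comp (s : List Char) :
    ∀ K i need (cur : List Char), s.length - i ≤ K →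
      innerB s (s.length + 1) i (need + 1) cur =
        match fnsA s (s.length + 1) i with
        | none => none
        | some l => innerB s (s.length + 1) l need (cur ++ (s.drop i).take (l - i)) := by
  intro K
  induction K with
  | zero =>
    intro i need cur hK
    have hgi : s[i]? = none := List.getElem?_eq_none (by omega)
    unfold innerB fnsA
    simp [hgi]
  | succ K ih =>
    intro i need cur hK
    conv_lhs => unfold innerB
    conv_rhs => unfold fnsA
    simp only [Nat.succ_ne_zero, if_false]
    cases hgi : s[i]? with
    | none => rfl
    | some c =>
      have hi : i < s.length := by
        by_contra hle
        rw [List.getElem?_eq_none (by omega)] at hgi; simp at hgi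
      have hcv : s[i] = c := by
        rw [List.getElem?_eq_getElem hi] at hgi; exact Option.some_inj.mp hgi
      have hdrop : s.drop i = c :: s.drop (i + 1) := by
        rw [← hcv]; exact (List.getElem_cons_drop hi).symm
      by_cases hc : c = '1'
      · subst hc
        simp only [ne_eq, not_true_eq_false, ite_false, ite_true, Nat.add_zero, Nat.add_sub_cancel]
        rw [show (s.drop i).take (i + 1 - i) = ['1'] by rw [hdrop]; simp]
        exact innerB_stab s s.length (s.length + 1) (i + 1) need (cur ++ ['1']) (by omega) (by omega)
      · simp only [hc, if_false]
        have harith : (need + 1 - 1) + (if c ≠ '1' then 2 else 0) = (need + 1) + 1 := by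
          rw [if_pos hc]; omega
        rw [harith]
        have e1 : innerB s s.length (i + 1) (need + 1 + 1) (cur ++ [c]) =
            innerB s (s.length + 1) (i + 1) (need + 1 + 1) (cur ++ [c]) :=
          innerB_stab s s.length (s.length + 1) (i + 1) _ _ (by omega) (by omega)
        rw [e1, ih (i + 1) (need + 1) (cur ++ [c]) (by omega)]
        have e3 : fnsA s s.length (i + 1) = fnsA s (s.length + 1) (i + 1) :=
          fnsA_stab s s.length (s.length + 1) (i + 1) (by omega) (by omega)
        rw [e3]
        cases hm : fnsA s (s.length + 1) (i + 1) with
        | none => simp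
        | some m =>
          have hbm := fnsA_bounds s (s.length + 1) (i + 1) m hm
          simp only []
          rw [ih m need (cur ++ [c] ++ (s.drop (i + 1)).take (m - (i + 1))) (by omega)]
          have e4 : fnsA s s.length m = fnsA s (s.length + 1) m :=
            fnsA_stab s s.length (s.length + 1) m (by omega) (by omega)
          rw [e4]
          cases hl : fnsA s (s.length + 1) m with
          | none => simp
          | some l =>
            have hbl := fnsA_bounds s (s.length + 1) m l hl
            simp only []
            have hsplit : (s.drop i).take (l - i) =
                c :: ((s.drop (i + 1)).take (m - (i + 1)) ++ (s.drop m).take (l - m)) := by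
              rw [hdrop, show l - i = (l - (i + 1)) + 1 by omega, List.take_succ_cons,
                slice_split s (i + 1) m l (by omega) (by omega)]
            rw [hsplit]
            simp [List.append_assoc]

-- One tree: B's inner loop returns fnsA's stopping point with exactly the sliced characters.
theorem innerB_one (s : List Char) (i : Nat) (cur : List Char) :
    innerB s (s.length + 1) i 1 cur =
      match fnsA s (s.length + 1) i with
      | none => none
      | some l => some (l, cur ++ (s.drop i).take (l - i)) := by
  rw [innerB_comp s (s.length - i) i 0 cur (by omega)]
  cases hl : fnsA s (s.length + 1) i with
  | none => rfl
  | some l => unfold innerB; simp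

-- The outer loops therefore agree (A builds its list reversed, B in order).
theorem outer_eq (s : List Char) :
    ∀ f i (acc : List String), outerA s f i acc = outerB s f i acc.reverse := by
  intro f
  induction f with
  | zero => intro i acc; rfl
  | succ f ih =>
    intro i acc
    unfold outerA outerB
    rw [innerB_one s i []]
    cases hl : fnsA s (s.length + 1) i with
    | none => simp
    | some ns =>
      simp only []
      split_ifs
      · rw [ih ns (String.ofList ((s.drop i).take (ns - i)) :: acc)]
        simp
      · rfl

-- ===== VERDICT (by name: the statement is the Claim_ definition above) =====
theorem find_decode_strings_spec : Claim_equal_find_decode_strings := by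
  intro bit_string _ _
  unfold Spec_find_decode_strings find_decode_strings find_decode_strings_alt
  rw [outer_eq bit_string.toList (bit_string.toList.length + 1) 0 []]
  rfl
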